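-- pv_equiv track=rewrite | github.com/T6nisValk/School | Basics/Journey Exercises/Basic operations/task_2.py | preceded_by_prime
-- ===== SOURCE A (Python) =====
-- import math
--
-- def preceded_by_prime(number):
--     def valid_prime_number(x):
--         if x <= 1:
--             return False
--         for num in range(2, int(math.sqrt(x)) + 1):
--             if x % num == 0:
--                 return False
--         return True
--
--     if valid_prime_number(number - 1):
--         return True
--     else:
--         return False
-- ===== SOURCE B (Python) =====
-- def preceded_by_prime(number):
--     # x = number - 1 is prime iff no prime up to isqrt(x) divides it;
--     # collect those primes with a sieve of Eratosthenes.
--     x = number - 1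
--     if x < 2:
--         return False
--     r = 1
--     while (r + 1) * (r + 1) <= x:
--         r += 1
--     is_comp = [False] * (r + 1)
--     p = 2
--     while p <= r:
--         if not is_comp[p]:
--             if x % p == 0:
--                 return False
--             for m in range(p * p, r + 1, p):
--                 is_comp[m] = True
--         p += 1
--     return True
-- ===== Notes on version B (the rewrite author's own statement) =====
-- stated objective: alternative
-- what changed: B replaces A's trial division by every integer up to int(math.sqrt(x)) with a sieve of Eratosthenes: it computes the integer square root by incremental search, builds a boolean composite table by marking multiples, and divides x = number-1 only by the sieved primes.
import Mathlib
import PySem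

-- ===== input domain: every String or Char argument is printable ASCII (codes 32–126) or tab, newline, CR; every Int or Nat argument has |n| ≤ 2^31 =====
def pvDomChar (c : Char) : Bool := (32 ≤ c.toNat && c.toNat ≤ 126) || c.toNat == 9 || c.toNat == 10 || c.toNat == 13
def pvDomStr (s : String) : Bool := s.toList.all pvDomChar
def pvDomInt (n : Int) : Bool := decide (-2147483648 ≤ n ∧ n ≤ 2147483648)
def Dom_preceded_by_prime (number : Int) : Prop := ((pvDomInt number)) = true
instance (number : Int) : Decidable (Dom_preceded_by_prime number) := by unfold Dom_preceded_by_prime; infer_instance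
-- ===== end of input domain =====

-- B tests the primality of number-1 with a sieve of Eratosthenes (isqrt by incremental
-- search, marking multiples, dividing only by sieved primes) instead of A's trial
-- division by every integer up to int(math.sqrt(x)).

-- ===== PORT A =====
-- int(math.sqrt(x)) is ported as Nat.sqrt x.toNat: it is only evaluated for 2 ≤ x,
-- and for 2 ≤ x ≤ 2^31 math.sqrt's correctly rounded double equals isqrt exactly.
def preceded_by_prime (number : Int) : Bool :=
  let valid_prime_number : Int → Bool := fun x =>
    if x ≤ 1 then false
    else if (PySem.List.pyRange 2 ((Nat.sqrt x.toNat : Int) + 1) 1).any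
              (fun num => PySem.Int.mod x num == 0) then false
    else true
  if valid_prime_number (number - 1) then true else false

-- ===== PORT B =====
-- Loop variables x-1, r, p, m of Source B are nonnegative Python ints here, ported as Nat.
-- the incremental isqrt loop 'while (r + 1) * (r + 1) <= x: r += 1'
def pbpIsqrt (x r : Nat) : Nat :=
  if (r + 1) * (r + 1) ≤ x then pbpIsqrt x (r + 1) else r
termination_by x - r
decreasing_by
  have : r + 1 ≤ (r + 1) * (r + 1) := Nat.le_mul_of_pos_left _ (by omega)
  omega

-- the inner 'for m in range(p * p, r + 1, p): is_comp[m] = True' (range materialized;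
-- the count is Python's exact range length for a positive step)
def pbpMark (comp : List Bool) (p r : Nat) : List Bool :=
  (List.range' (p * p) ((r + 1 - p * p + (p - 1)) / p) p).foldl
    (fun c m => c.set m true) comp

-- the outer 'while p <= r' loop with its early 'return False'
def pbpSieve (x r : Nat) (comp : List Bool) (p : Nat) : Bool :=
  if p ≤ r then
    if !(comp.getD p false) then
      if x % p = 0 then false
      else pbpSieve x r (pbpMark comp p r) (p + 1)
    else pbpSieve x r comp (p + 1)
  else true
termination_by r + 1 - p

def preceded_by_prime_alt (number : Int) : Bool :=
  let x := number - 1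
  if x < 2 then false
  else
    let r := pbpIsqrt x.toNat 1
    pbpSieve x.toNat r (List.replicate (r + 1) false) 2

-- ===== PRECONDITION & SPEC =====
def Spec_preceded_by_prime (number : Int) (out : Bool) : Prop := out = preceded_by_prime_alt number
instance (number : Int) (out : Bool) : Decidable (Spec_preceded_by_prime number out) := by unfold Spec_preceded_by_prime; infer_instance

-- ===== CLAIM (what is proved, stated in full; the proofs are below) =====
def Claim_equal_preceded_by_prime : Prop := ∀ (number : Int), Dom_preceded_by_prime number → Spec_preceded_by_prime number (preceded_by_prime number)

-- ===== LEMMAS AND PROOFS =====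

-- Int version of Nat.le_sqrt: d ≤ ⌊√x⌋ ↔ d*d ≤ x, for 0 ≤ d, 0 ≤ x
lemma le_sqrt_int (x d : Int) (hx : 0 ≤ x) (hd : 0 ≤ d) :
    d ≤ (Nat.sqrt x.toNat : Int) ↔ d * d ≤ x := by
  obtain ⟨n, rfl⟩ : ∃ n : Nat, x = (n : Int) := ⟨x.toNat, by omega⟩
  obtain ⟨m, rfl⟩ : ∃ m : Nat, d = (m : Int) := ⟨d.toNat, by omega⟩
  rw [Int.toNat_natCast]
  constructor
  · intro h
    have := Nat.le_sqrt.mp (by exact_mod_cast h)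
    exact_mod_cast this
  · intro h
    exact_mod_cast Nat.le_sqrt.mpr (by exact_mod_cast h)

-- A's any over range(2, isqrt+1) is true iff x has a divisor d ≥ 2 with d*d ≤ x
lemma anyA_iff (x : Int) (hx : 2 ≤ x) :
    ((PySem.List.pyRange 2 ((Nat.sqrt x.toNat : Int) + 1) 1).any
      (fun num => PySem.Int.mod x num == 0) = true) ↔
    ∃ d : Int, 2 ≤ d ∧ d * d ≤ x ∧ d ∣ x := by
  rw [List.any_eq_true]
  constructor
  · rintro ⟨d, hmem, hp⟩
    rw [PySem.List.mem_pyRange_one] at hmem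
    obtain ⟨h2, hlt⟩ := hmem
    refine ⟨d, h2, ?_, ?_⟩
    · exact (le_sqrt_int x d (by omega) (by omega)).mp (by omega)
    · have := PySem.Int.mod_eq_zero_iff_dvd x d
      simpa [this] using hp
  · rintro ⟨d, h2, hsq, hdvd⟩
    have := (le_sqrt_int x d (by omega) (by omega)).mpr hsq
    exact ⟨d, PySem.List.mem_pyRange_one.mpr ⟨h2, by omega⟩,
      by simpa [PySem.Int.mod_eq_zero_iff_dvd x d] using hdvd⟩

-- A returns true exactly when number - 1 is prime (as a natural number)
lemma A_true_iff (number : Int) :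
    preceded_by_prime number = true ↔ Nat.Prime (number - 1).toNat := by
  unfold preceded_by_prime
  set x := number - 1 with hx
  by_cases h1 : x ≤ 1
  · simp only [h1, if_pos]
    have : (number - 1).toNat ≤ 1 := by omega
    constructor
    · intro h; simp at h
    · intro hp; exact absurd (hp.two_le) (by omega)
  · have hx2 : 2 ≤ x := by omega
    have hn : x.toNat = (number - 1).toNat := by rw [hx]
    simp only [if_neg h1]
    rw [Nat.prime_def_le_sqrt]
    constructor
    · intro h
      by_cases hA : ((PySem.List.pyRange 2 ((Nat.sqrt x.toNat : Int) + 1) 1).any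
          (fun num => PySem.Int.mod x num == 0)) = true
      · simp [hA] at h
      · refine ⟨by omega, fun m hm2 hms hdvd => ?_⟩
        have hm2' : (2 : Int) ≤ (m : Int) := by exact_mod_cast hm2
        have hsq : (m : Int) * (m : Int) ≤ x := by
          have h' : m * m ≤ x.toNat := Nat.le_sqrt.mp (by rwa [hn])
          have : ((m * m : Nat) : Int) ≤ ((x.toNat : Nat) : Int) := by exact_mod_cast h'
          push_cast at this; omega
        have hdvd' : (m : Int) ∣ x := by
          have : ((m : Nat) : Int) ∣ ((x.toNat : Nat) : Int) := by
            exact_mod_cast (by rwa [hn] : m ∣ x.toNat)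
          simpa [Int.toNat_of_nonneg (by omega : (0:Int) ≤ x)] using this
        exact hA ((anyA_iff x hx2).mpr ⟨m, hm2', hsq, hdvd'⟩)
    · rintro ⟨-, hnd⟩
      have hA : ¬ ((PySem.List.pyRange 2 ((Nat.sqrt x.toNat : Int) + 1) 1).any
          (fun num => PySem.Int.mod x num == 0)) = true := by
        rw [anyA_iff x hx2]
        rintro ⟨d, hd2, hsq, hdvd⟩
        have hd0 : 0 ≤ d := by omega
        have hsqn : d.toNat ≤ Nat.sqrt (number - 1).toNat := by
          rw [← hn]
          apply Nat.le_sqrt.mpr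
          have : ((d.toNat * d.toNat : Nat) : Int) ≤ ((x.toNat : Nat) : Int) := by
            push_cast
            rw [Int.toNat_of_nonneg hd0, Int.toNat_of_nonneg (by omega : (0:Int) ≤ x)]
            exact hsq
          exact_mod_cast this
        have hdvdn : d.toNat ∣ (number - 1).toNat := by
          rw [← hn]
          have : ((d.toNat : Nat) : Int) ∣ ((x.toNat : Nat) : Int) := by
            rw [Int.toNat_of_nonneg hd0, Int.toNat_of_nonneg (by omega : (0:Int) ≤ x)]
            exact hdvd
          exact_mod_cast this
        exact hnd d.toNat (by omega) hsqn hdvdn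
      simp [hA]

-- the incremental search computes Nat.sqrt
lemma pbpIsqrt_eq (x : Nat) : ∀ (k r : Nat), x - r = k → 1 ≤ r → r * r ≤ x →
    pbpIsqrt x r = Nat.sqrt x := by
  intro k
  induction k using Nat.strong_induction_on with
  | _ k ih =>
    intro r hk h1 hrx
    unfold pbpIsqrt
    by_cases h : (r + 1) * (r + 1) ≤ x
    · rw [if_pos h]
      have hr1 : r + 1 ≤ (r + 1) * (r + 1) := Nat.le_mul_of_pos_left _ (by omega)
      exact ih (x - (r + 1)) (by omega) (r + 1) rfl (by omega) h
    · rw [if_neg h]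
      have h2 : Nat.sqrt x < r + 1 := Nat.sqrt_lt.mpr (by omega)
      have h3 : r ≤ Nat.sqrt x := Nat.le_sqrt.mpr hrx
      omega

-- a fold of 'set · true' only turns on the written indices
lemma getD_foldl_set_true (L : List Nat) : ∀ (c : List Bool) (q : Nat),
    (L.foldl (fun c m => c.set m true) c).getD q false = true →
    c.getD q false = true ∨ q ∈ L := by
  induction L with
  | nil => exact fun c q h => Or.inl h
  | cons m L ih =>
      intro c q h
      rcases ih (c.set m true) q h with h' | h'
      · by_cases hqm : q = m
        · exact Or.inr (by simp [hqm])
        · left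
          rwa [List.getD_eq_getElem?_getD, List.getElem?_set_ne (Ne.symm hqm),
               ← List.getD_eq_getElem?_getD] at h'
      · exact Or.inr (List.mem_cons_of_mem _ h')

-- marking multiples of p only marks non-primes
lemma pbpMark_spec (comp : List Bool) (p r : Nat) (hp : 2 ≤ p) (q : Nat)
    (h : (pbpMark comp p r).getD q false = true) :
    comp.getD q false = true ∨ ¬ q.Prime := by
  rcases getD_foldl_set_true _ comp q h with h' | h'
  · exact Or.inl h'
  · right
    rw [List.mem_range'] at h'
    obtain ⟨i, -, rfl⟩ := h'
    intro hq
    have hd : p ∣ p * p + p * i := ⟨p + i, by ring⟩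
    have hpp : p * 2 ≤ p * p := Nat.mul_le_mul_left p hp
    rcases hq.eq_one_or_self_of_dvd p hd with h1 | h1 <;> omega

-- the sieve loop returns False iff some prime ≤ r divides n, given that marked
-- entries are non-prime and primes below the cursor do not divide n
lemma pbpSieve_false_iff (n r : Nat) (_hn : 2 ≤ n) :
    ∀ (k p : Nat), r + 1 - p = k → 2 ≤ p →
    ∀ comp : List Bool, (∀ q, comp.getD q false = true → ¬ q.Prime) →
    (∀ q, q < p → q.Prime → ¬ q ∣ n) →
    (pbpSieve n r comp p = false ↔ ∃ q, q.Prime ∧ q ≤ r ∧ q ∣ n) := by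
  intro k
  induction k using Nat.strong_induction_on with
  | _ k ih =>
    intro p hk hp comp H1 H2
    unfold pbpSieve
    by_cases hpr : p ≤ r
    · rw [if_pos hpr]
      by_cases hmark : comp.getD p false = true
      · rw [hmark]
        simp only [Bool.not_true, Bool.false_eq_true, if_false]
        refine ih (r + 1 - (p + 1)) (by omega) (p + 1) rfl (by omega) comp H1
          (fun q hq hqp => ?_)
        by_cases h : q < p
        · exact H2 q h hqp
        · have hqp' : q = p := by omega
          subst hqp'
          exact absurd hqp (H1 q hmark)
      · rw [Bool.not_eq_true] at hmark
        rw [hmark]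
        simp only [Bool.not_false, if_true]
        by_cases hdvd : n % p = 0
        · rw [if_pos hdvd]
          simp only [true_iff]
          obtain ⟨pf, hpf, hpfd⟩ := Nat.exists_prime_and_dvd (show p ≠ 1 by omega)
          exact ⟨pf, hpf, (Nat.le_of_dvd (by omega) hpfd).trans hpr,
            hpfd.trans (Nat.dvd_of_mod_eq_zero hdvd)⟩
        · rw [if_neg hdvd]
          refine ih (r + 1 - (p + 1)) (by omega) (p + 1) rfl (by omega) _
            (fun q hq => ?_) (fun q hq hqp => ?_)
          · rcases pbpMark_spec comp p r (by omega) q hq with h' | h'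
            · exact H1 q h'
            · exact h'
          · by_cases h : q < p
            · exact H2 q h hqp
            · have hqp' : q = p := by omega
              subst hqp'
              exact fun hdv => hdvd (Nat.dvd_iff_mod_eq_zero.mp hdv)
    · rw [if_neg hpr]
      simp only [Bool.true_eq_false, false_iff]
      rintro ⟨q, hq, hqr, hqd⟩
      exact H2 q (by omega) hq hqd

-- B returns true exactly when number - 1 is prime (as a natural number)
lemma B_true_iff (number : Int) :
    preceded_by_prime_alt number = true ↔ Nat.Prime (number - 1).toNat := by
  have hB : preceded_by_prime_alt number =
      (if number - 1 < 2 then false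
       else pbpSieve (number - 1).toNat (pbpIsqrt (number - 1).toNat 1)
         (List.replicate (pbpIsqrt (number - 1).toNat 1 + 1) false) 2) := rfl
  rw [hB]
  by_cases h1 : number - 1 < 2
  · rw [if_pos h1]
    constructor
    · intro h; simp at h
    · intro hp
      have := hp.two_le
      omega
  · rw [if_neg h1]
    have hn2 : 2 ≤ (number - 1).toNat := by omega
    generalize hg : (number - 1).toNat = n at hn2 ⊢
    rw [pbpIsqrt_eq n (n - 1) 1 rfl (by omega) (by omega)]
    have hrep : ∀ q : Nat, (List.replicate (Nat.sqrt n + 1) false).getD q false = true →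
        ¬ q.Prime := by
      intro q hq
      rw [List.getD_eq_getElem?_getD, List.getElem?_replicate] at hq
      by_cases h : q < Nat.sqrt n + 1 <;> simp [h] at hq
    have hiff := pbpSieve_false_iff n (Nat.sqrt n) hn2 (Nat.sqrt n + 1 - 2) 2 rfl (by omega)
      (List.replicate (Nat.sqrt n + 1) false) hrep
      (fun q hq hqp => absurd hqp.two_le (by omega))
    constructor
    · intro h
      rw [Nat.prime_def_le_sqrt]
      refine ⟨hn2, fun m hm2 hms hmd => ?_⟩
      obtain ⟨pf, hpf, hpfd⟩ := Nat.exists_prime_and_dvd (show m ≠ 1 by omega)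
      have hfalse : pbpSieve n (Nat.sqrt n) (List.replicate (Nat.sqrt n + 1) false) 2 = false :=
        hiff.mpr ⟨pf, hpf, (Nat.le_of_dvd (by omega) hpfd).trans hms, hpfd.trans hmd⟩
      rw [h] at hfalse
      simp at hfalse
    · intro hp
      rcases Bool.eq_false_or_eq_true
          (pbpSieve n (Nat.sqrt n) (List.replicate (Nat.sqrt n + 1) false) 2) with h | h
      · exact h
      exfalso
      obtain ⟨q, hq, hqr, hqd⟩ := hiff.mp h
      rcases hp.eq_one_or_self_of_dvd q hqd with h' | h'
      · exact absurd hq.two_le (by omega)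
      · subst h'
        exact absurd hqr (by have := Nat.sqrt_lt_self (show 1 < q by omega); omega)

-- ===== VERDICT (by name: the statement is the Claim_ definition above) =====
theorem preceded_by_prime_spec : Claim_equal_preceded_by_prime := by
  intro number _
  unfold Spec_preceded_by_prime
  have hA := A_true_iff number
  have hB := B_true_iff number
  cases hA' : preceded_by_prime number <;> cases hB' : preceded_by_prime_alt number <;>
    simp_all
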